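-- pv_equiv track=rewrite | github.com/thomazcabral/IP | Lista5/q3.py | pertence
-- ===== SOURCE A (Python) =====
-- def pertence(a, b):
--     erro = False
--     if (len(a) == len(b)):
--         i = 0
--         while i < len(a):
--             if (a[i] == b[i]):
--                 if (i == len(a) - 1):
--                     return True
--                 else:
--                     i += 1
--             else:
--                 break
--     else:
--         if (len(a) > len(b)):
--             return False
--         j = 0
--         while j < len(a) + 1 and (not erro):
--             try:
--                 if (a[j] == b[j]):
--                     j += 1
--                 else:
--                     return pertence(a, b[j + 1:])
--             except IndexError:
--                 erro = True
--                 return True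
--     if (len(b) == 0):
--         return False
-- ===== SOURCE B (Python) =====
-- def pertence(a, b):
--     while len(a) < len(b):
--         j = 0
--         while j < len(a) and a[j] == b[j]:
--             j += 1
--         if j == len(a):
--             return True
--         b = b[j + 1:]
--     return len(a) == len(b) and len(b) > 0 and a == b
-- ===== Notes on version B (the rewrite author's own statement) =====
-- stated objective: simpler
-- what changed: The recursion with its try/except IndexError sentinel and the separate equal-length index loop are replaced by one iterative while-loop that scans the common prefix, reassigns b = b[j+1:] on a mismatch, and finishes with a single boolean expression; Pre_ excludes exactly the inputs on which A falls off the end and returns None instead of a bool, and B is proved equal to A on every input where A returns a bool.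
-- outside the precondition, e.g. on pertence('a', 'bb'): A returns None, B returns False; on pertence('ab', 'ba'): A returns None, B returns False
import Mathlib
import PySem

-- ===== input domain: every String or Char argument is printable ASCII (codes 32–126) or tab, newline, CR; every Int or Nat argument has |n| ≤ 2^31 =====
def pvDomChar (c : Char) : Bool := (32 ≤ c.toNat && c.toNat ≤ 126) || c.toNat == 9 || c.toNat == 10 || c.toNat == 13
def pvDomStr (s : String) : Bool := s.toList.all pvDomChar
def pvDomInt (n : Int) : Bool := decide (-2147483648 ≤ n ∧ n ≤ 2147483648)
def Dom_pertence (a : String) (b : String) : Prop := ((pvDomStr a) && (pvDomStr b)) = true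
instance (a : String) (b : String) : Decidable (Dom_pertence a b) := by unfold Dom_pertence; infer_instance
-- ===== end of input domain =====

-- B replaces A's recursion + try/except with one iterative loop and a final boolean
-- expression (objective: simpler). Equivalence is claimed on Pre_, which admits every
-- input on which A returns a bool (outside it A returns None).

-- ===== PORT A =====
-- A's fall-through code after the equal-length loop breaks (or the j-loop exits):
-- 'if len(b) == 0: return False'; otherwise Python falls off the end and returns None,
-- which is outside the declared bool return type (Pre_ excludes every input reaching it);
-- it is rendered as false here.
def pertenceFall (b : List Char) : Bool :=
  if b.length = 0 then false
  else false  -- Python: implicit None (unreachable under Pre_pertence)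

-- the 'while i < len(a)' loop of the len(a) == len(b) branch; the indices are
-- nonnegative, so a[i] / b[i] succeed exactly when i is below the length
def pertenceEqLoop (a : List Char) (b : List Char) (i : Nat) : Bool :=
  if h0 : i < a.length then
    if h1 : i < b.length then
      if a[i] == b[i] then
        if i = a.length - 1 then true
        else pertenceEqLoop a b (i + 1)
      else pertenceFall b        -- break → fall-through
    else false                   -- IndexError on b[i]: unreachable, len a = len b here
  else pertenceFall b
termination_by a.length - i

mutual
-- pertence(a, b) on character lists
def pertenceGo (a : List Char) (b : List Char) : Bool :=
  if a.length = b.length then pertenceEqLoop a b 0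
  else if a.length > b.length then false
  else pertenceJLoop a b 0
termination_by (b.length, a.length + 2)
decreasing_by apply Prod.Lex.right; omega

-- the 'while j < len(a) + 1' loop with its try/except: j is nonnegative, so a[j]
-- (resp. b[j]) raises IndexError exactly when j ≥ the length ('erro' is never
-- consulted: every branch that sets it returns at once)
def pertenceJLoop (a : List Char) (b : List Char) (j : Nat) : Bool :=
  if j < a.length + 1 then
    if h1 : j < a.length then
      if h2 : j < b.length then
        if a[j] == b[j] then pertenceJLoop a b (j + 1)
        else pertenceGo a (PySem.List.slice b (some ((j : Int) + 1)) none)  -- pertence(a, b[j+1:])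
      else true                  -- IndexError on b[j] → except: return True
    else true                    -- IndexError on a[j] → except: return True
  else pertenceFall b
termination_by (b.length, a.length + 1 - j)
decreasing_by
  · apply Prod.Lex.right; omega
  · apply Prod.Lex.left
    have hcast : ((j : Int) + 1) = (((j + 1 : Nat)) : Int) := by push_cast; ring
    rw [hcast, PySem.List.slice_from_natCast, List.length_drop]
    omega
end

def pertence (a : String) (b : String) : Bool := pertenceGo a.toList b.toList

-- ===== PORT B =====
-- 'while j < len(a) and a[j] == b[j]: j += 1' (b is longer than a at every call site)
def pertenceAltScan (a : List Char) (b : List Char) (j : Nat) : Nat :=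
  if j < a.length && (a.getD j default == b.getD j default) then pertenceAltScan a b (j + 1)
  else j
termination_by a.length - j
decreasing_by
  rename_i h
  simp only [Bool.and_eq_true, decide_eq_true_eq] at h
  omega

-- the 'while len(a) < len(b)' loop of Source B
def pertenceAltGo (a : List Char) (b : List Char) : Bool :=
  if a.length < b.length then
    let j := pertenceAltScan a b 0
    if j = a.length then true
    else pertenceAltGo a (b.drop (j + 1))  -- b = b[j+1:]
  else decide (a.length = b.length) && decide (0 < b.length) && a == b
termination_by b.length
decreasing_by simp; omega

def pertence_alt (a : String) (b : String) : Bool := pertenceAltGo a.toList b.toList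

-- ===== PRECONDITION & SPEC =====
-- One left-to-right pass over b detecting whether A ends in an equal-length nonempty
-- mismatch (Python falls off the end and returns None there): i counts matched chars
-- of a; on a mismatch the attempt restarts at the very next char of b unless the rest
-- of b is no longer than a, where A's final comparison decides.
def pvWalk (a : List Char) : Nat → List Char → Bool
  | _, [] => true
  | i, c :: s' =>
    if i = a.length then true
    else if a.getD i default = c then pvWalk a (i + 1) s'
    else if a.length < s'.length then pvWalk a 0 s'
    else if s'.length = a.length then decide (s' = a)
    else true

-- Pre_ excludes EXACTLY the inputs on which Python A returns None instead of a bool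
-- (an equal-length nonempty mismatch, reached directly or after A's skips b = b[j+1:]);
-- that outcome has no input-shape formula, so the predicate detects it with the single
-- linear scan pvWalk (neither port's recursion: both ports re-start on slices of b).
def pvPreOK (a : List Char) (b : List Char) : Bool :=
  if a.length = b.length then decide (a = b)
  else if b.length < a.length then true
  else pvWalk a 0 b

def Pre_pertence (a : String) (b : String) : Prop := pvPreOK a.toList b.toList = true
instance (a : String) (b : String) : Decidable (Pre_pertence a b) := by
  unfold Pre_pertence; infer_instance

def pvWitness_pertence : String × String := ("ab", "aab")

def Spec_pertence (a : String) (b : String) (out : Bool) : Prop := out = pertence_alt a b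
instance (a : String) (b : String) (out : Bool) : Decidable (Spec_pertence a b out) := by
  unfold Spec_pertence; infer_instance

-- ===== CLAIM (what is proved, stated in full; the proofs are below) =====
def Claim_equal_pertence : Prop := ∀ (a : String) (b : String), Dom_pertence a b → Pre_pertence a b → Spec_pertence a b (pertence a b)

-- ===== LEMMAS AND PROOFS =====

-- length of the common prefix of two lists (proof-side only)
def pvLcp : List Char → List Char → Nat
  | x :: xs, y :: ys => if x = y then pvLcp xs ys + 1 else 0
  | _, _ => 0

-- the scan, stated against the common-prefix length of the remainders
theorem walk_eq (a : List Char) (s : List Char) (i : Nat) (hi : i ≤ a.length) :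
    pvWalk a i s =
      (if pvLcp (a.drop i) s = a.length - i then true
       else if a.length < (s.drop (pvLcp (a.drop i) s + 1)).length then
         pvWalk a 0 (s.drop (pvLcp (a.drop i) s + 1))
       else if (s.drop (pvLcp (a.drop i) s + 1)).length = a.length then
         decide ((s.drop (pvLcp (a.drop i) s + 1)) = a)
       else true) := by
  induction s generalizing i with
  | nil =>
    rcases Nat.lt_or_ge i a.length with hlt | hge
    · have h0 : pvLcp (a.drop i) [] = 0 := by
        cases a.drop i <;> simp [pvLcp]
      rw [pvWalk, h0, if_neg (by omega)]
      simp
      omega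
    · have hie : i = a.length := by omega
      have h0 : pvLcp (a.drop i) [] = 0 := by
        cases a.drop i <;> simp [pvLcp]
      rw [pvWalk, h0, if_pos (by omega)]
  | cons c s' ih =>
    rcases Nat.lt_or_ge i a.length with hlt | hge
    · have hdrop : a.drop i = a[i] :: a.drop (i + 1) := List.drop_eq_getElem_cons hlt
      have hget : a.getD i default = a[i] := List.getD_eq_getElem _ _ hlt
      rw [pvWalk, if_neg (by omega), hdrop, pvLcp]
      by_cases hc : a[i] = c
      · rw [if_pos hc, if_pos (by rw [hget]; exact hc), ih (i + 1) (by omega)]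
        rw [List.drop_succ_cons]
        exact if_congr (by omega) rfl rfl
      · rw [if_neg hc, if_neg (by rw [hget]; exact hc)]
        rw [if_neg (show ¬ (0 = a.length - i) by omega)]
        simp only [List.drop_succ_cons, List.drop_zero]
        rfl
    · have hie : i = a.length := by omega
      have h0 : a.drop i = [] := List.drop_eq_nil_of_le (by omega)
      rw [pvWalk, if_pos hie, h0]
      have : pvLcp [] (c :: s') = 0 := by simp [pvLcp]
      rw [this, if_pos (by omega)]

-- one skip step of A preserves the precondition scan
theorem preOK_step (a b : List Char) (hlt : a.length < b.length)
    (hne : pvLcp a b ≠ a.length) :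
    pvPreOK a b = pvPreOK a (b.drop (pvLcp a b + 1)) := by
  rw [pvPreOK, if_neg (by omega), if_neg (by omega),
    walk_eq a b 0 (by omega), List.drop_zero, Nat.sub_zero, if_neg hne]
  set r := b.drop (pvLcp a b + 1) with hr
  rw [pvPreOK]
  rcases Nat.lt_trichotomy a.length r.length with h | h | h
  · rw [if_pos h, if_neg (show ¬ a.length = r.length by omega),
      if_neg (show ¬ r.length < a.length by omega)]
  · rw [if_neg (show ¬ a.length < r.length by omega),
      if_pos (show r.length = a.length from h.symm), if_pos h]
    simp [eq_comm]
  · rw [if_neg (show ¬ a.length < r.length by omega),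
      if_neg (show ¬ r.length = a.length by omega),
      if_neg (show ¬ a.length = r.length by omega), if_pos h]

theorem pvLcp_getElem (a b : List Char) (j : Nat) (hja : j < a.length) (hjb : j < b.length) :
    pvLcp (a.drop j) (b.drop j) =
      if a[j] = b[j] then pvLcp (a.drop (j + 1)) (b.drop (j + 1)) + 1 else 0 := by
  rw [List.drop_eq_getElem_cons hja, List.drop_eq_getElem_cons hjb, pvLcp]

-- B's scan from j computes j plus the common-prefix length of the remainders
theorem altScan_eq (a b : List Char) (j : Nat) (hlen : a.length ≤ b.length) :
    pertenceAltScan a b j = j + pvLcp (a.drop j) (b.drop j) := by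
  rw [pertenceAltScan.eq_def]
  by_cases hja : j < a.length
  · have hjb : j < b.length := by omega
    rw [pvLcp_getElem a b j hja hjb]
    have hga : a.getD j default = a[j] := List.getD_eq_getElem _ _ hja
    have hgb : b.getD j default = b[j] := List.getD_eq_getElem _ _ hjb
    by_cases hab : a[j] = b[j]
    · rw [if_pos hab, if_pos (by rw [hga, hgb]; simp [hja, hab])]
      rw [altScan_eq a b (j + 1) hlen]; omega
    · rw [if_neg hab, if_neg (by rw [hga, hgb]; simp [hja, hab])]
      omega
  · have h1 : a.drop j = [] := List.drop_eq_nil_of_le (by omega)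
    rw [if_neg (by simp [hja]), h1]
    cases b.drop j <;> simp [pvLcp]
termination_by a.length - j

-- A's j-loop from j: succeeds when the scan reaches len a, else recurses on b[m+1:]
theorem jLoop_eq (a b : List Char) (hlt : a.length < b.length) (j : Nat) (hj : j ≤ a.length) :
    pertenceJLoop a b j =
      (if j + pvLcp (a.drop j) (b.drop j) = a.length then true
       else pertenceGo a (b.drop (j + pvLcp (a.drop j) (b.drop j) + 1))) := by
  rw [pertenceJLoop.eq_def, if_pos (by omega : j < a.length + 1)]
  by_cases hja : j < a.length
  · have hjb : j < b.length := by omega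
    rw [dif_pos hja, dif_pos hjb, pvLcp_getElem a b j hja hjb]
    by_cases hab : a[j] = b[j]
    · rw [if_pos (by simp [hab]), if_pos hab,
        jLoop_eq a b hlt (j + 1) (by omega)]
      have : j + (pvLcp (a.drop (j + 1)) (b.drop (j + 1)) + 1)
           = j + 1 + pvLcp (a.drop (j + 1)) (b.drop (j + 1)) := by omega
      rw [this]
    · rw [if_neg (by simp [hab]), if_neg hab]
      simp only [Nat.add_zero]
      rw [if_neg (by omega : ¬ j = a.length)]
      have hcast : ((j : Int) + 1) = (((j + 1 : Nat)) : Int) := by push_cast; ring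
      rw [hcast, PySem.List.slice_from_natCast]
  · rw [dif_neg hja]
    have hje : j = a.length := by omega
    have h1 : a.drop j = [] := List.drop_eq_nil_of_le (by omega)
    rw [h1]
    have : pvLcp [] (b.drop j) = 0 := by cases b.drop j <;> simp [pvLcp]
    rw [this, if_pos (by omega)]
termination_by a.length - j

-- A's equal-length loop accepts a against itself from any i < len a
theorem eqLoop_self (a : List Char) (i : Nat) (h : i < a.length) :
    pertenceEqLoop a a i = true := by
  rw [pertenceEqLoop.eq_def, dif_pos h, dif_pos h]
  simp only [beq_self_eq_true, if_true]
  by_cases hlast : i = a.length - 1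
  · rw [if_pos hlast]
  · rw [if_neg hlast]
    exact eqLoop_self a (i + 1) (by omega)
termination_by a.length - i

-- main equivalence on lists, by induction on b.length
theorem go_eq_altGo (a b : List Char) (hpre : pvPreOK a b = true) :
    pertenceGo a b = pertenceAltGo a b := by
  rw [pertenceGo.eq_def, pertenceAltGo.eq_def]
  rcases Nat.lt_trichotomy a.length b.length with hlt | heq | hgt
  · -- a shorter: both do the skip scan
    rw [if_neg (by omega), if_neg (by omega), if_pos hlt]
    rw [jLoop_eq a b hlt 0 (by omega)]
    rw [altScan_eq a b 0 (by omega)]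
    simp only [List.drop_zero, Nat.zero_add]
    by_cases hfull : pvLcp a b = a.length
    · rw [if_pos hfull, if_pos hfull]
    · rw [if_neg hfull, if_neg hfull]
      -- recursive case: the precondition scan steps to the same shrunk b
      rw [preOK_step a b hlt hfull] at hpre
      exact go_eq_altGo a (b.drop (pvLcp a b + 1)) hpre
  · -- equal lengths: pvPreOK forces a = b
    have hab : a = b := by
      rw [pvPreOK, if_pos heq] at hpre
      exact of_decide_eq_true hpre
    subst hab
    rw [if_pos rfl, if_neg (by omega)]
    rcases Nat.eq_zero_or_pos a.length with h0 | h0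
    · rw [pertenceEqLoop.eq_def, dif_neg (by omega)]
      unfold pertenceFall
      simp [h0]
    · rw [eqLoop_self a 0 h0]
      simp [h0]
  · -- b shorter: both return false
    rw [if_neg (by omega), if_pos (by omega), if_neg (by omega)]
    have hne : a.length ≠ b.length := by omega
    rw [decide_eq_false hne]
    simp
termination_by b.length
decreasing_by simp; omega

-- ===== VERDICT (by name: the statement is the Claim_ definition above) =====
theorem pertence_spec : Claim_equal_pertence := by
  intro a b _ hpre
  unfold Spec_pertence pertence pertence_alt
  exact go_eq_altGo a.toList b.toList hpre
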